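-- pv_equiv track=rewrite | github.com/asistenterh37-cpu/Juegos | Rompecabezas.py | neighbors_of_blank
-- ===== SOURCE A (Python) =====
-- def index_to_rc(i, n):
--     return (i // n, i % n)
--
-- def rc_to_index(r, c, n):
--     return r*n + c
--
-- def neighbors_of_blank(board, n):
--     blank = board.index(0)
--     r, c = index_to_rc(blank, n)
--     moves = []
--     for dr, dc in [(-1,0),(1,0),(0,-1),(0,1)]:
--         rr, cc = r+dr, c+dc
--         if 0 <= rr < n and 0 <= cc < n:
--             moves.append(rc_to_index(rr, cc, n))
--     return moves
-- ===== SOURCE B (Python) =====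
-- def neighbors_of_blank(board, n):
--     blank = board.index(0)
--     if n < 1:
--         return []
--     def manhattan(j):
--         return abs(j // n - blank // n) + abs(j % n - blank % n)
--     return [j for j in (blank - n, blank + n, blank - 1, blank + 1)
--             if 0 <= j < n * n and manhattan(j) == 1]
-- ===== Notes on version B (the rewrite author's own statement) =====
-- stated objective: alternative
-- what changed: B replaces A's (row,col) conversion and loop over four direction offsets with generate-and-test on the flat index: the four candidate indices blank-n, blank+n, blank-1, blank+1 are filtered by one uniform predicate (in grid range and Manhattan distance 1 from the blank), so there is no per-direction bounds logic at all.
-- outside the precondition, e.g. on neighbors_of_blank([1, 0], 1): A returns [0], B returns [0, 0]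
import Mathlib
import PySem

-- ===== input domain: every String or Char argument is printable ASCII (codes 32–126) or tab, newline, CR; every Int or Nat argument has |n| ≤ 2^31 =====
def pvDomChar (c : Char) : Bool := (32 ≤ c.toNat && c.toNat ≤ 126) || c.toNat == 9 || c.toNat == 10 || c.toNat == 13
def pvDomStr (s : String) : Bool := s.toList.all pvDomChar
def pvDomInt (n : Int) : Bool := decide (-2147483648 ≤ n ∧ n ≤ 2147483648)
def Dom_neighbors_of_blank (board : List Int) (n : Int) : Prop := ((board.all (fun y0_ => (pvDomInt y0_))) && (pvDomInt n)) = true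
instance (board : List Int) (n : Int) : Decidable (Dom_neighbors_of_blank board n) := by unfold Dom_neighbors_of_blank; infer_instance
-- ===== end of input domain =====

-- B drops the (row,col) offset loop: it generates the four flat candidate indices and keeps
-- those in grid range at Manhattan distance 1 from the blank (objective: alternative).


-- ===== PORT A =====
def index_to_rc (i n : Int) : Int × Int := (PySem.Int.floordiv i n, PySem.Int.mod i n)

def rc_to_index (r c n : Int) : Int := r * n + c

def neighbors_of_blank (board : List Int) (n : Int) : List Int :=
  match PySem.List.index? board 0 with
  | none => []  -- Python raises ValueError here; excluded by Pre_
  | some blank =>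
    let rc := index_to_rc (blank : Int) n
    ([((-1 : Int), (0 : Int)), (1, 0), (0, -1), (0, 1)]).foldl
      (fun moves d =>
        let rr := rc.1 + d.1
        let cc := rc.2 + d.2
        if 0 ≤ rr ∧ rr < n ∧ 0 ≤ cc ∧ cc < n then moves ++ [rc_to_index rr cc n] else moves)
      []

-- ===== PORT B =====
-- abs(j // n - blank // n) + abs(j % n - blank % n)
def pvManhattan (blank n j : Int) : Int :=
  ((PySem.Int.floordiv j n - PySem.Int.floordiv blank n).natAbs : Int) +
  ((PySem.Int.mod j n - PySem.Int.mod blank n).natAbs : Int)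

def neighbors_of_blank_alt (board : List Int) (n : Int) : List Int :=
  match PySem.List.index? board 0 with
  | none => []  -- Python raises ValueError here; excluded by Pre_
  | some bk =>
    let blank : Int := bk
    if n < 1 then []
    else
      ([blank - n, blank + n, blank - 1, blank + 1]).filter
        (fun j => decide (0 ≤ j ∧ j < n * n) && (pvManhattan blank n j == 1))

-- ===== PRECONDITION & SPEC =====
-- Pre_ excludes the inputs where A raises (no 0 in the board: ValueError; n = 0:
-- ZeroDivisionError) and the single malformed corner n = 1 with the blank at flat index 1 —
-- a cell outside the 1×1 grid, where A's [0] and B's [0, 0] are equally accidental values.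
def Pre_neighbors_of_blank (board : List Int) (n : Int) : Prop :=
  (0 : Int) ∈ board ∧ n ≠ 0 ∧ ¬(n = 1 ∧ (board.idxOf (0 : Int) : Int) = 1)
instance (board : List Int) (n : Int) : Decidable (Pre_neighbors_of_blank board n) := by
  unfold Pre_neighbors_of_blank; infer_instance

def pvWitness_neighbors_of_blank : List Int × Int := ([1, 0, 2, 3, 4, 5, 6, 7, 8], 3)

def Spec_neighbors_of_blank (board : List Int) (n : Int) (out : List Int) : Prop := out = neighbors_of_blank_alt board n
instance (board : List Int) (n : Int) (out : List Int) : Decidable (Spec_neighbors_of_blank board n out) := by unfold Spec_neighbors_of_blank; infer_instance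

-- ===== CLAIM (what is proved, stated in full; the proofs are below) =====
def Claim_equal_neighbors_of_blank : Prop := ∀ (board : List Int) (n : Int), Dom_neighbors_of_blank board n → Pre_neighbors_of_blank board n → Spec_neighbors_of_blank board n (neighbors_of_blank board n)

-- ===== LEMMAS AND PROOFS =====

-- canonical form both ports are reduced to (conditions on b // n and b % n)
def canon (b n : Int) : List Int :=
  (if 1 ≤ PySem.Int.floordiv b n ∧ PySem.Int.floordiv b n ≤ n then [b - n] else []) ++
  (if PySem.Int.floordiv b n ≤ n - 2 then [b + n] else []) ++
  (if 1 ≤ PySem.Int.mod b n ∧ PySem.Int.floordiv b n ≤ n - 1 then [b - 1] else []) ++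
  (if PySem.Int.mod b n ≤ n - 2 ∧ PySem.Int.floordiv b n ≤ n - 1 then [b + 1] else [])

set_option maxHeartbeats 1000000 in
theorem core_A (b n : Int) (hb : 0 ≤ b) (hn : 1 ≤ n) :
    (([((-1 : Int), (0 : Int)), (1, 0), (0, -1), (0, 1)]).foldl
      (fun moves d =>
        let rr := (PySem.Int.floordiv b n, PySem.Int.mod b n).1 + d.1
        let cc := (PySem.Int.floordiv b n, PySem.Int.mod b n).2 + d.2
        if 0 ≤ rr ∧ rr < n ∧ 0 ≤ cc ∧ cc < n then moves ++ [rr * n + cc] else moves)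
      []) = canon b n := by
  have hn0 : 0 < n := by omega
  have hm0 : 0 ≤ PySem.Int.mod b n := PySem.Int.mod_nonneg b hn0
  have hmlt : PySem.Int.mod b n < n := PySem.Int.mod_lt b hn0
  have hqm : PySem.Int.floordiv b n * n + PySem.Int.mod b n = b :=
    PySem.Int.floordiv_mul_add_mod b n
  have hq0 : 0 ≤ PySem.Int.floordiv b n := by
    have := (PySem.Int.le_floordiv_iff_mul_le (a := b) (b := n) (q := 0) hn0); omega
  unfold canon
  generalize hQ : PySem.Int.floordiv b n = q at *
  generalize hM : PySem.Int.mod b n = m at *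
  simp only [List.foldl]
  have hv1 : (q + -1) * n + (m + 0) = b - n := by linear_combination hqm
  have hv2 : (q + 1) * n + (m + 0) = b + n := by linear_combination hqm
  have hv3 : (q + 0) * n + (m + -1) = b - 1 := by linear_combination hqm
  have hv4 : (q + 0) * n + (m + 1) = b + 1 := by linear_combination hqm
  have c1 : (0 ≤ q + -1 ∧ q + -1 < n ∧ 0 ≤ m + 0 ∧ m + 0 < n) ↔ (1 ≤ q ∧ q ≤ n) := by omega
  have c2 : (0 ≤ q + 1 ∧ q + 1 < n ∧ 0 ≤ m + 0 ∧ m + 0 < n) ↔ (q ≤ n - 2) := by omega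
  have c3 : (0 ≤ q + 0 ∧ q + 0 < n ∧ 0 ≤ m + -1 ∧ m + -1 < n) ↔ (1 ≤ m ∧ q ≤ n - 1) := by omega
  have c4 : (0 ≤ q + 0 ∧ q + 0 < n ∧ 0 ≤ m + 1 ∧ m + 1 < n) ↔ (m ≤ n - 2 ∧ q ≤ n - 1) := by omega
  simp only [c1, c2, c3, c4, hv1, hv2, hv3, hv4, List.nil_append]
  split_ifs <;> simp

set_option maxHeartbeats 1000000 in
theorem core_B (b n : Int) (hb : 0 ≤ b) (hn : 1 ≤ n) (hx : ¬(n = 1 ∧ b = 1)) :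
    (([b - n, b + n, b - 1, b + 1]).filter
      (fun j => decide (0 ≤ j ∧ j < n * n) && (pvManhattan b n j == 1))) = canon b n := by
  have hn0 : 0 < n := by omega
  have hm0 : 0 ≤ PySem.Int.mod b n := PySem.Int.mod_nonneg b hn0
  have hmlt : PySem.Int.mod b n < n := PySem.Int.mod_lt b hn0
  have hqm : PySem.Int.floordiv b n * n + PySem.Int.mod b n = b :=
    PySem.Int.floordiv_mul_add_mod b n
  have hq0 : 0 ≤ PySem.Int.floordiv b n := by
    have := (PySem.Int.le_floordiv_iff_mul_le (a := b) (b := n) (q := 0) hn0); omega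
  -- div/mod values of the vertical candidates
  have hfU : PySem.Int.floordiv (b - n) n = PySem.Int.floordiv b n - 1 := by
    rw [PySem.Int.floordiv_eq_iff_of_pos hn0]; constructor <;> nlinarith
  have hmU : PySem.Int.mod (b - n) n = PySem.Int.mod b n := by
    have h2 := PySem.Int.floordiv_mul_add_mod (b - n) n
    rw [hfU] at h2; linear_combination h2 - hqm
  have hfD : PySem.Int.floordiv (b + n) n = PySem.Int.floordiv b n + 1 := by
    rw [PySem.Int.floordiv_eq_iff_of_pos hn0]; constructor <;> nlinarith
  have hmD : PySem.Int.mod (b + n) n = PySem.Int.mod b n := by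
    have h2 := PySem.Int.floordiv_mul_add_mod (b + n) n
    rw [hfD] at h2; linear_combination h2 - hqm
  have hqn : PySem.Int.floordiv b n ≤ n - 1 ↔ b < n * n := by
    have h2 := (PySem.Int.floordiv_lt_iff_lt_mul (a := b) (b := n) (q := n) hn0)
    omega
  -- the four predicate values
  have hup : (decide (0 ≤ b - n ∧ b - n < n * n) && (pvManhattan b n (b - n) == 1))
      = decide (1 ≤ PySem.Int.floordiv b n ∧ PySem.Int.floordiv b n ≤ n) := by
    have hman : pvManhattan b n (b - n) = 1 := by
      simp only [pvManhattan, hfU, hmU]; omega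
    rw [hman]
    rw [show ((1 : Int) == 1) = true from rfl, Bool.and_true, decide_eq_decide]
    have h1 := (PySem.Int.le_floordiv_iff_mul_le (a := b) (b := n) (q := 1) hn0)
    have h2 := (PySem.Int.floordiv_lt_iff_lt_mul (a := b) (b := n) (q := n + 1) hn0)
    rw [one_mul] at h1
    rw [show (n + 1) * n = n * n + n from by ring] at h2
    omega
  have hdn : (decide (0 ≤ b + n ∧ b + n < n * n) && (pvManhattan b n (b + n) == 1))
      = decide (PySem.Int.floordiv b n ≤ n - 2) := by
    have hman : pvManhattan b n (b + n) = 1 := by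
      simp only [pvManhattan, hfD, hmD]; omega
    rw [hman]
    rw [show ((1 : Int) == 1) = true from rfl, Bool.and_true, decide_eq_decide]
    have h2 := (PySem.Int.floordiv_lt_iff_lt_mul (a := b) (b := n) (q := n - 1) hn0)
    rw [show (n - 1) * n = n * n - n from by ring] at h2
    omega
  have hlf : (decide (0 ≤ b - 1 ∧ b - 1 < n * n) && (pvManhattan b n (b - 1) == 1))
      = decide (1 ≤ PySem.Int.mod b n ∧ PySem.Int.floordiv b n ≤ n - 1) := by
    by_cases hm1 : 1 ≤ PySem.Int.mod b n
    · have hfL : PySem.Int.floordiv (b - 1) n = PySem.Int.floordiv b n := by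
        rw [PySem.Int.floordiv_eq_iff_of_pos hn0]; constructor <;> nlinarith
      have hmL : PySem.Int.mod (b - 1) n = PySem.Int.mod b n - 1 := by
        have h2 := PySem.Int.floordiv_mul_add_mod (b - 1) n
        rw [hfL] at h2; linear_combination h2 - hqm
      have hman : pvManhattan b n (b - 1) = 1 := by
        simp only [pvManhattan, hfL, hmL]; omega
      rw [hman]
      rw [show ((1 : Int) == 1) = true from rfl, Bool.and_true, decide_eq_decide]
      constructor
      · intro h
        refine ⟨hm1, ?_⟩
        by_contra hc
        nlinarith [mul_le_mul_of_nonneg_right (show n ≤ PySem.Int.floordiv b n by omega) (le_of_lt hn0)]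
      · intro h
        have hblt : b < n * n := hqn.mp h.2
        exact ⟨by nlinarith, by omega⟩
    · -- b % n = 0 : the left candidate crosses a row boundary
      have hm00 : PySem.Int.mod b n = 0 := by omega
      by_cases hb0 : b = 0
      · rw [show (decide (0 ≤ b - 1 ∧ b - 1 < n * n)) = false from
          decide_eq_false (by omega), Bool.false_and]
        symm; exact decide_eq_false (by omega)
      · have hb1 : 1 ≤ b := by omega
        have hfL : PySem.Int.floordiv (b - 1) n = PySem.Int.floordiv b n - 1 := by
          rw [PySem.Int.floordiv_eq_iff_of_pos hn0]; constructor <;> nlinarith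
        have hmL : PySem.Int.mod (b - 1) n = n - 1 := by
          have h2 := PySem.Int.floordiv_mul_add_mod (b - 1) n
          rw [hfL] at h2; linear_combination h2 - hqm + hm00
        have hman : pvManhattan b n (b - 1) = n := by
          simp only [pvManhattan, hfL, hmL, hm00]; omega
        by_cases hn1 : n = 1
        · -- n = 1: b ≥ 2 here (b = 1 is excluded), so b - 1 is out of the 1-cell grid
          have hb2 : 2 ≤ b := by
            rcases (lt_or_ge b 2) with h | h
            · exact absurd ⟨hn1, by omega⟩ hx
            · exact h
          rw [show (decide (0 ≤ b - 1 ∧ b - 1 < n * n)) = false from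
            decide_eq_false (by rw [hn1]; omega), Bool.false_and]
          symm; exact decide_eq_false (by omega)
        · rw [show (pvManhattan b n (b - 1) == 1) = false from by
            rw [hman]; exact beq_eq_false_iff_ne.mpr (by omega), Bool.and_false]
          symm; exact decide_eq_false (by omega)
  have hrt : (decide (0 ≤ b + 1 ∧ b + 1 < n * n) && (pvManhattan b n (b + 1) == 1))
      = decide (PySem.Int.mod b n ≤ n - 2 ∧ PySem.Int.floordiv b n ≤ n - 1) := by
    by_cases hm2 : PySem.Int.mod b n ≤ n - 2
    · have hfR : PySem.Int.floordiv (b + 1) n = PySem.Int.floordiv b n := by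
        rw [PySem.Int.floordiv_eq_iff_of_pos hn0]; constructor <;> nlinarith
      have hmR : PySem.Int.mod (b + 1) n = PySem.Int.mod b n + 1 := by
        have h2 := PySem.Int.floordiv_mul_add_mod (b + 1) n
        rw [hfR] at h2; linear_combination h2 - hqm
      have hman : pvManhattan b n (b + 1) = 1 := by
        simp only [pvManhattan, hfR, hmR]; omega
      rw [hman]
      rw [show ((1 : Int) == 1) = true from rfl, Bool.and_true, decide_eq_decide]
      constructor
      · intro h; exact ⟨hm2, hqn.mpr (by omega)⟩
      · intro h
        have hq1 : PySem.Int.floordiv b n ≤ n - 1 := h.2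
        exact ⟨by omega, by nlinarith⟩
    · -- b % n = n - 1 : the right candidate crosses a row boundary
      have hmn1 : PySem.Int.mod b n = n - 1 := by omega
      have hfR : PySem.Int.floordiv (b + 1) n = PySem.Int.floordiv b n + 1 := by
        rw [PySem.Int.floordiv_eq_iff_of_pos hn0]; constructor <;> nlinarith
      have hmR : PySem.Int.mod (b + 1) n = 0 := by
        have h2 := PySem.Int.floordiv_mul_add_mod (b + 1) n
        rw [hfR] at h2; linear_combination h2 - hqm + hmn1
      have hman : pvManhattan b n (b + 1) = n := by
        simp only [pvManhattan, hfR, hmR, hmn1]; omega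
      by_cases hn1 : n = 1
      · rw [show (decide (0 ≤ b + 1 ∧ b + 1 < n * n)) = false from
          decide_eq_false (by rw [hn1]; omega), Bool.false_and]
        symm; exact decide_eq_false (by omega)
      · rw [show (pvManhattan b n (b + 1) == 1) = false from by
          rw [hman]; exact beq_eq_false_iff_ne.mpr (by omega), Bool.and_false]
        symm; exact decide_eq_false (by omega)
  simp only [List.filter_cons, List.filter_nil, hup, hdn, hlf, hrt, decide_eq_true_eq]
  unfold canon
  split_ifs <;> simp

theorem index?_eq_some_idxOf (xs : List Int) (h : (0 : Int) ∈ xs) :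
    PySem.List.index? xs 0 = some (xs.idxOf 0) := by
  induction xs with
  | nil => cases h
  | cons x xs ih =>
    by_cases hx : x = 0
    · subst hx
      rw [PySem.List.index?_cons_self]
      simp
    · have hm : (0 : Int) ∈ xs := by
        rcases List.mem_cons.mp h with h' | h'
        · exact absurd h'.symm hx
        · exact h'
      rw [PySem.List.index?_cons_of_ne _ hx, ih hm]
      simp [hx]

-- ===== VERDICT (by name: the statement is the Claim_ definition above) =====
theorem neighbors_of_blank_spec : Claim_equal_neighbors_of_blank := by
  intro board n _ hpre
  obtain ⟨hmem, hn0, hx⟩ := hpre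
  unfold Spec_neighbors_of_blank neighbors_of_blank neighbors_of_blank_alt
  rw [index?_eq_some_idxOf board hmem]
  simp only [index_to_rc, rc_to_index]
  by_cases hn : 1 ≤ n
  · rw [if_neg (show ¬ n < 1 by omega)]
    rw [core_A ((board.idxOf 0 : Nat) : Int) n (Int.natCast_nonneg _) hn,
        core_B ((board.idxOf 0 : Nat) : Int) n (Int.natCast_nonneg _) hn hx]
  · -- n < 0 (n = 0 is excluded): A's bounds check never holds, B's guard returns []
    have hfalse : ∀ rr cc : Int, ¬(0 ≤ rr ∧ rr < n ∧ 0 ≤ cc ∧ cc < n) := by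
      intro rr cc; omega
    simp only [List.foldl]
    rw [if_neg (hfalse _ _), if_neg (hfalse _ _), if_neg (hfalse _ _), if_neg (hfalse _ _),
      if_pos (show n < 1 by omega)]
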